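-- pv_equiv track=rewrite | github.com/Harshad725250/Zero_Trust_Multi_Cloud_Framework | evaluate_metrics.py | calculate_pep_metrics
-- ===== SOURCE A (Python) =====
-- def calculate_pep_metrics(pep_data):
--     total = len(pep_data)
--     allow = sum(1 for e in pep_data if e["decision"].upper() == "ALLOW")
--     deny = sum(1 for e in pep_data if e["decision"].upper() == "DENY")
--     review = sum(1 for e in pep_data if e["decision"].upper() == "REVIEW")
--     return {
--         "Total Access Requests": total,
--         "Allow": allow,
--         "Deny": deny,
--         "Review": review
--     }
-- ===== SOURCE B (Python) =====
-- def calculate_pep_metrics(pep_data):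
--     # Single tally pass instead of three scans; same KeyError on missing 'decision'.
--     counts = {}
--     for e in pep_data:
--         k = e["decision"].upper()
--         counts[k] = counts.get(k, 0) + 1
--     return {
--         "Total Access Requests": len(pep_data),
--         "Allow": counts.get("ALLOW", 0),
--         "Deny": counts.get("DENY", 0),
--         "Review": counts.get("REVIEW", 0)
--     }
-- ===== Notes on version B (the rewrite author's own statement) =====
-- stated objective: alternative
-- what changed: Replaces three independent scans of pep_data (one generator-sum per label) with a single tally pass building a counts dict, then three constant-time lookups.
import Mathlib
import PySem

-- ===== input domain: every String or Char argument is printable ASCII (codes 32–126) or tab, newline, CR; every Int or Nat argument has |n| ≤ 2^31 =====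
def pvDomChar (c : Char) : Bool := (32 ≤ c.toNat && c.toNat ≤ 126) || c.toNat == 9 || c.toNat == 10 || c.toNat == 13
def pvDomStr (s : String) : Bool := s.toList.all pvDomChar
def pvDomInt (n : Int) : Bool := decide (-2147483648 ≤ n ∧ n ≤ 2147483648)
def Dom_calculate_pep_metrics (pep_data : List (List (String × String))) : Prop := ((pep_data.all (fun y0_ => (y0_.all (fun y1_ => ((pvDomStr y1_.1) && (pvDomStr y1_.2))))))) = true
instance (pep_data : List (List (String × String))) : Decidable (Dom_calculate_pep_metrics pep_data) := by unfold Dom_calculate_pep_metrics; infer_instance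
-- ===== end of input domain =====

-- B replaces A's three independent scans of pep_data with one tally pass over a counts dict (one fewer traversal per label).


-- e["decision"].upper() (exact under Pre_, which guarantees the key is present)
def pvDecision (e : List (String × String)) : String :=
  PySem.Str.upper (PySem.Dict.getD (PySem.Dict.mk e) "decision" "")

-- ===== PORT A =====
def calculate_pep_metrics (pep_data : List (List (String × String))) : List (String × Int) :=
  let total : Int := PySem.List.len pep_data
  let allow : Int := pep_data.foldl (fun acc e => if pvDecision e == "ALLOW" then acc + 1 else acc) 0
  let deny : Int := pep_data.foldl (fun acc e => if pvDecision e == "DENY" then acc + 1 else acc) 0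
  let review : Int := pep_data.foldl (fun acc e => if pvDecision e == "REVIEW" then acc + 1 else acc) 0
  [("Total Access Requests", total), ("Allow", allow), ("Deny", deny), ("Review", review)]

-- ===== PORT B =====
def calculate_pep_metrics_alt (pep_data : List (List (String × String))) : List (String × Int) :=
  let counts : PySem.Dict String Int :=
    pep_data.foldl (fun c e => let k := pvDecision e; c.insert k (c.getD k 0 + 1)) PySem.Dict.empty
  [("Total Access Requests", PySem.List.len pep_data),
   ("Allow", counts.getD "ALLOW" 0),
   ("Deny", counts.getD "DENY" 0),
   ("Review", counts.getD "REVIEW" 0)]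

-- ===== PRECONDITION & SPEC =====
-- Pre_ excludes exactly the inputs where A raises KeyError: an entry without a "decision" key.
def Pre_calculate_pep_metrics (pep_data : List (List (String × String))) : Prop :=
  (pep_data.all (fun e => (PySem.Dict.mk e).contains "decision")) = true
instance (pep_data : List (List (String × String))) : Decidable (Pre_calculate_pep_metrics pep_data) := by
  unfold Pre_calculate_pep_metrics; infer_instance

def pvWitness_calculate_pep_metrics : (List (List (String × String))) :=
  [[("decision", "allow")], [("decision", "DENY"), ("user", "bob")]]

def Spec_calculate_pep_metrics (pep_data : List (List (String × String))) (out : List (String × Int)) : Prop := out = calculate_pep_metrics_alt pep_data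
instance (pep_data : List (List (String × String))) (out : List (String × Int)) : Decidable (Spec_calculate_pep_metrics pep_data out) := by unfold Spec_calculate_pep_metrics; infer_instance

-- ===== CLAIM (what is proved, stated in full; the proofs are below) =====
def Claim_equal_calculate_pep_metrics : Prop := ∀ (pep_data : List (List (String × String))), Dom_calculate_pep_metrics pep_data → Pre_calculate_pep_metrics pep_data → Spec_calculate_pep_metrics pep_data (calculate_pep_metrics pep_data)

-- ===== LEMMAS AND PROOFS =====

-- B's tally lookup at label L equals the count of entries whose decision is L.
lemma alt_counts_getD (pep_data : List (List (String × String))) (L : String) :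
    (pep_data.foldl (fun c e => let k := pvDecision e; c.insert k (c.getD k 0 + 1))
        (PySem.Dict.empty : PySem.Dict String Int)).getD L 0
      = (List.countP (fun e => pvDecision e == L) pep_data : Int) := by
  have h := PySem.Dict.getD_foldl_insert_add_one (pep_data.map pvDecision)
      (PySem.Dict.empty : PySem.Dict String Int) L
  rw [List.foldl_map] at h
  simpa [List.count_eq_countP, List.countP_map, Function.comp_def, BEq.comm] using h

-- ===== VERDICT (by name: the statement is the Claim_ definition above) =====
theorem calculate_pep_metrics_spec : Claim_equal_calculate_pep_metrics := by
  intro pep_data _ _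
  unfold Spec_calculate_pep_metrics calculate_pep_metrics calculate_pep_metrics_alt
  simp only [alt_counts_getD, PySem.List.foldl_count_if, Int.zero_add]
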